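-- pv_equiv track=rewrite | github.com/victor201202/Lexer | src/Regex.py | strip_spaces
-- ===== SOURCE A (Python) =====
-- def strip_spaces(regex: str):
--     regex2 = str()
--     for i in range(len(regex)):
--         if i > 0:
--             if regex[i] != ' ' or (regex[i] == ' ' and regex[i - 1] == '\\'):
--                 regex2 = regex2 + regex[i]
--         elif regex[i] != ' ':
--             regex2 = regex2 + regex[i]
--     return regex2
-- ===== SOURCE B (Python) =====
-- def strip_spaces(regex: str):
--     out = []
--     i = 0
--     n = len(regex)
--     while i < n:
--         if regex[i] == '\\' and i + 1 < n and regex[i + 1] == ' ':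
--             out.append('\\ ')
--             i += 2
--         elif regex[i] == ' ':
--             i += 1
--         else:
--             out.append(regex[i])
--             i += 1
--     return ''.join(out)
-- ===== Notes on version B (the rewrite author's own statement) =====
-- stated objective: alternative
-- what changed: Replaced the index loop that looks back at regex[i-1] to decide each character with a token-consuming scan that eats backslash-space escape pairs whole, skips lone spaces, and joins the collected pieces at the end (no lookback, no per-char string concatenation).
import Mathlib
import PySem

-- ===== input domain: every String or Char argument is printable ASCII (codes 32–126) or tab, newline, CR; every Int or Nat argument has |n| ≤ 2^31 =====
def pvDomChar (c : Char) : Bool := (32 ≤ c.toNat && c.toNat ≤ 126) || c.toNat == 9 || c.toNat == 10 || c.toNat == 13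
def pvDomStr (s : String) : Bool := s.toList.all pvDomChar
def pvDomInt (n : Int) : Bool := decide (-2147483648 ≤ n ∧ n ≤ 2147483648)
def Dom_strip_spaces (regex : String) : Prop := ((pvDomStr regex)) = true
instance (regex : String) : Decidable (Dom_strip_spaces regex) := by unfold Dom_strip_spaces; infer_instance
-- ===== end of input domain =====

-- B replaces A's index loop with lookback at regex[i-1] by a scan that consumes '\ ' escape pairs whole (alternative decomposition).

-- ===== PORT A =====
-- A: index loop over range(len(regex)); chars are collected in a list (Python's string
-- concatenation regex2 + regex[i]) and packed into a String at the end.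
def strip_spaces (regex : String) : String :=
  let cs := regex.toList
  String.mk <|
    (PySem.List.pyRange 0 (PySem.Str.len regex) 1).foldl
      (fun regex2 i =>
        if i > 0 then
          if PySem.List.pyGet? cs i ≠ some ' ' ∨
              (PySem.List.pyGet? cs i = some ' ' ∧ PySem.List.pyGet? cs (i - 1) = some '\\') then
            regex2 ++ (PySem.List.pyGet? cs i).toList
          else regex2
        else if PySem.List.pyGet? cs i ≠ some ' ' then
          regex2 ++ (PySem.List.pyGet? cs i).toList
        else regex2)
      []

-- ===== PORT B =====
-- B: consume the char list token by token: a '\ ' pair is emitted whole, a lone space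
-- is skipped, any other char is emitted (Source B's while loop as structural recursion).
def stripSpacesGo : List Char → List Char
  | '\\' :: ' ' :: rest => '\\' :: ' ' :: stripSpacesGo rest
  | ' ' :: rest => stripSpacesGo rest
  | c :: rest => c :: stripSpacesGo rest
  | [] => []

def strip_spaces_alt (regex : String) : String :=
  String.mk (stripSpacesGo regex.toList)

-- ===== PRECONDITION & SPEC =====
def Spec_strip_spaces (regex : String) (out : String) : Prop := out = strip_spaces_alt regex
instance (regex : String) (out : String) : Decidable (Spec_strip_spaces regex out) := by unfold Spec_strip_spaces; infer_instance

-- ===== CLAIM (what is proved, stated in full; the proofs are below) =====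
def Claim_equal_strip_spaces : Prop := ∀ (regex : String), Dom_strip_spaces regex → Spec_strip_spaces regex (strip_spaces regex)

-- ===== LEMMAS AND PROOFS =====

-- the loop body of A's port, named for the proofs
def aBody (cs : List Char) (regex2 : List Char) (i : Int) : List Char :=
  if i > 0 then
    if PySem.List.pyGet? cs i ≠ some ' ' ∨
        (PySem.List.pyGet? cs i = some ' ' ∧ PySem.List.pyGet? cs (i - 1) = some '\\') then
      regex2 ++ (PySem.List.pyGet? cs i).toList
    else regex2
  else if PySem.List.pyGet? cs i ≠ some ' ' then
    regex2 ++ (PySem.List.pyGet? cs i).toList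
  else regex2

theorem strip_spaces_eq (regex : String) :
    strip_spaces regex
      = String.mk ((PySem.List.pyRange 0 (regex.toList.length : Int) 1).foldl (aBody regex.toList) []) := by
  rfl

-- A with a remembered previous character: keep c iff c ≠ ' ' or prev = '\'.
def scanPrev : Option Char → List Char → List Char
  | _, [] => []
  | p, c :: rest => (if c ≠ ' ' ∨ p = some '\\' then [c] else []) ++ scanPrev (some c) rest

theorem foldl_eq_scanPrev (cs : List Char) :
    ∀ (k : Nat) (acc : List Char), k ≤ cs.length →
    (PySem.List.pyRange (k : Int) (cs.length : Int) 1).foldl (aBody cs) acc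
      = acc ++ scanPrev (if k = 0 then none else cs[k-1]?) (cs.drop k) := by
  intro k
  induction hd : cs.length - k generalizing k with
  | zero =>
    intro acc hk
    have hk' : k = cs.length := by omega
    subst hk'
    rw [PySem.List.pyRange_one_eq_nil (le_refl _)]
    simp [scanPrev]
  | succ d ih =>
    intro acc hk
    have hlt : k < cs.length := by omega
    rw [PySem.List.pyRange_one_cons (by exact_mod_cast hlt)]
    rw [List.foldl_cons]
    have hstep : ((k : Int) + 1) = ((k + 1 : Nat) : Int) := by push_cast; ring
    rw [hstep, ih (k + 1) (by omega) _ (by omega)]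
    have hget : PySem.List.pyGet? cs (k : Int) = some cs[k] := by
      simp [List.getElem?_eq_getElem hlt]
    have hdrop : cs.drop k = cs[k] :: cs.drop (k + 1) := List.drop_eq_getElem_cons hlt
    have hprev1 : (if k + 1 = 0 then none else cs[k+1-1]?) = some cs[k] := by
      simp [List.getElem?_eq_getElem hlt]
    rw [hprev1, hdrop]
    by_cases hk0 : k = 0
    · subst hk0
      have hb : aBody cs acc ((0 : Nat) : Int) =
          acc ++ (if cs[0] ≠ ' ' then [cs[0]] else []) := by
        have hget0 : PySem.List.pyGet? cs (0 : Int) = some cs[0] := by simpa using hget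
        simp only [aBody, Nat.cast_zero, hget0]
        rw [if_neg (by norm_num)]
        by_cases hsp : cs[0] = ' ' <;> simp [hsp]
      rw [hb, if_pos rfl]
      simp only [scanPrev]
      by_cases hsp : cs[0] = ' ' <;> simp [hsp]
    · have hk1 : k - 1 < cs.length := by omega
      have hgetp : PySem.List.pyGet? cs ((k : Int) - 1) = some cs[k-1] := by
        have hc : ((k : Int) - 1) = ((k - 1 : Nat) : Int) := by
          rw [Nat.cast_sub (by omega)]; norm_num
        rw [hc]
        simp [List.getElem?_eq_getElem hk1]
      have hb : aBody cs acc ((k : Nat) : Int) =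
          acc ++ (if cs[k] ≠ ' ' ∨ cs[k-1] = '\\' then [cs[k]] else []) := by
        simp only [aBody, hget, hgetp]
        rw [if_pos (by exact_mod_cast Nat.pos_of_ne_zero hk0)]
        by_cases hsp : cs[k] = ' ' <;> by_cases hbs : cs[k-1] = '\\' <;> simp [hsp, hbs]
      rw [hb, if_neg hk0]
      simp only [scanPrev, List.getElem?_eq_getElem hk1]
      by_cases hsp : cs[k] = ' ' <;> by_cases hbs : cs[k-1] = '\\' <;> simp [hsp, hbs]

theorem scanPrev_eq_go (cs : List Char) (p : Option Char)
    (h : p = some '\\' → cs.head? ≠ some ' ') :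
    scanPrev p cs = stripSpacesGo cs := by
  induction cs using stripSpacesGo.induct generalizing p with
  | case1 rest ih =>
    simp only [scanPrev, stripSpacesGo]
    simp [ih (some ' ') (by simp)]
  | case2 rest ih =>
    simp only [scanPrev, stripSpacesGo]
    have hp : ¬ (p = some '\\') := fun hc => (h hc) rfl
    rw [if_neg (by simp [hp])]
    exact ih (some ' ') (by simp)
  | case3 c rest hpat hsp ih =>
    have hc : c ≠ ' ' := fun hh => hsp hh
    have hgo : stripSpacesGo (c :: rest) = c :: stripSpacesGo rest := by
      rw [stripSpacesGo.eq_def]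
      split
      · next heq =>
        injection heq with h1 h2
        exact absurd h2 (fun hh => hpat _ h1 hh)
      · next heq =>
        injection heq with h1 h2
        exact absurd h1 (fun hh => hsp hh)
      · next heq =>
        injection heq with h1 h2
        rw [h1, h2]
      · next heq => exact absurd heq (by simp)
    rw [hgo]
    simp only [scanPrev]
    rw [if_pos (Or.inl hc)]
    have hrest : some c = some '\\' → rest.head? ≠ some ' ' := by
      intro hcb hh
      injection hcb with hcb
      cases rest with
      | nil => simp at hh
      | cons r rs => simp at hh; exact hpat rs hcb (by rw [hh])
    simp [ih (some c) hrest]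
  | case4 => rfl

-- ===== VERDICT (by name: the statement is the Claim_ definition above) =====
theorem strip_spaces_spec : Claim_equal_strip_spaces := by
  intro regex _
  unfold Spec_strip_spaces strip_spaces_alt
  rw [strip_spaces_eq]
  have h1 := foldl_eq_scanPrev regex.toList 0 [] (Nat.zero_le _)
  simp only [Nat.cast_zero, List.drop_zero, List.nil_append, if_pos] at h1
  rw [h1, scanPrev_eq_go regex.toList none (by simp)]
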